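-- pv_equiv track=rewrite | github.com/thepratholic/Competitive-Programming | LeetCode/Biweekly Contest 170/Lexicographically Smallest Negated Permutation that Sums to Target.py | lexSmallestNegatedPerm
-- ===== SOURCE A (Python) =====
-- from typing import List
--
-- def lexSmallestNegatedPerm(n: int, target: int) -> List[int]:
--     tot = n * (n + 1) // 2
--     if abs(target) > tot or (tot + target) & 1:
--         return []
--
--     x = (tot + target) // 2
--     rem = x
--     pos = [False] * (n + 1)
--
--     for i in range(n, 0, -1):
--         S_prev = (i - 1) * i // 2
--         if rem > S_prev:
--             pos[i] = True
--             rem -= i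
--
--     res = []
--     for i in range(n, 0, -1):
--         if not pos[i]:
--             res.append(-i)
--
--     for i in range(1, n + 1):
--         if pos[i]:
--             res.append(i)
--
--     return res
-- ===== SOURCE B (Python) =====
-- from typing import List
--
-- def lexSmallestNegatedPerm(n: int, target: int) -> List[int]:
--     if n <= 0:
--         return []
--     tot = n * (n + 1) // 2
--     if abs(target) > tot or (tot + target) % 2:
--         return []
--
--     # D = sum of the numbers that get a minus sign
--     D = (tot - target) // 2
--
--     # largest m in [0, n] whose top-m sum n + (n-1) + ... + (n-m+1) fits in D,
--     # found by binary search on the monotone sum m*(2n - m + 1)//2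
--     lo, hi = 0, n
--     while lo < hi:
--         mid = (lo + hi + 1) // 2
--         if mid * (2 * n - mid + 1) // 2 <= D:
--             lo = mid
--         else:
--             hi = mid - 1
--     m = lo
--     r = D - m * (2 * n - m + 1) // 2   # one extra number to negate (0 if none)
--
--     head = list(range(-n, -n + m))     # -n, -(n-1), ..., -(n-m+1)
--     if r:
--         head.append(-r)
--     return head + [i for i in range(1, n - m + 1) if i != r]
-- ===== Notes on version B (the rewrite author's own statement) =====
-- stated objective: faster
-- what changed: Replaces A's descending greedy loop with a boolean mark array and two read-back scans by a closed-form characterisation of the negated set: a binary search finds the count m of negated top elements, the remainder r is the one extra negated number, and the answer is assembled directly from three ranges.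
import Mathlib
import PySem

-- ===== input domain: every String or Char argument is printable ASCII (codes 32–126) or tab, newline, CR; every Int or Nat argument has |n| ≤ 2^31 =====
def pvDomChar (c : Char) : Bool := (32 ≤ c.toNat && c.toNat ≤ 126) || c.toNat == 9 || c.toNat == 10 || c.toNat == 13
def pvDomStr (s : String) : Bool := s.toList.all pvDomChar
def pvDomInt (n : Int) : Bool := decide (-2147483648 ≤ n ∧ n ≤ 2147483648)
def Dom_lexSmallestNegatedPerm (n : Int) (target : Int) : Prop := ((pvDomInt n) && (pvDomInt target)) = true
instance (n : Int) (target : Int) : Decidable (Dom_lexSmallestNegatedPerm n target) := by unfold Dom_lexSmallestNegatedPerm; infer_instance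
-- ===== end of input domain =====

-- B replaces A's descending greedy with a mark array by a binary search for the count m
-- of negated top elements plus direct range construction (lower constant factor).

-- ===== PORT A =====
-- Literal port of A: the greedy loop over range(n,0,-1) marking pos[i], then two
-- read-back loops.  pos[i] is read with getD at i.toNat: every access has 1 ≤ i ≤ n
-- and len(pos) = n+1, so this is exact (Python never raises here).
-- '(tot + target) & 1' is PySem.Int.band _ 1, Python-exact on negatives.
def lexSmallestNegatedPerm (n : Int) (target : Int) : List Int :=
  let tot := PySem.Int.floordiv (n * (n + 1)) 2
  if |target| > tot ∨ PySem.Int.band (tot + target) 1 ≠ 0 then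
    []
  else
    let x := PySem.Int.floordiv (tot + target) 2
    let st := (PySem.List.pyRange n 0 (-1)).foldl
      (fun (st : List Bool × Int) i =>
        let sPrev := PySem.Int.floordiv ((i - 1) * i) 2
        if st.2 > sPrev then (st.1.set i.toNat true, st.2 - i) else st)
      (List.replicate (n + 1).toNat false, x)
    let pos := st.1
    let res := (PySem.List.pyRange n 0 (-1)).foldl
      (fun acc i => if !(pos.getD i.toNat false) then acc ++ [-i] else acc) []
    (PySem.List.pyRange 1 (n + 1) 1).foldl
      (fun acc i => if pos.getD i.toNat false then acc ++ [i] else acc) res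

-- ===== PORT B =====
-- termination helper for the binary-search midpoint (cited by pvBSearch's decreasing_by)
theorem pvMid_bounds (lo hi : Int) (h : lo < hi) :
    lo + 1 ≤ PySem.Int.floordiv (lo + hi + 1) 2 ∧ PySem.Int.floordiv (lo + hi + 1) 2 ≤ hi := by
  have h2 : lo + 1 ≤ hi := by omega
  have := PySem.Int.floordiv_two_mid_bounds h2
  have e : lo + 1 + hi = lo + hi + 1 := by ring
  rw [e] at this
  exact this

-- B's 'while lo < hi' binary search for the largest m with top-m sum ≤ D
def pvBSearch (n D lo hi : Int) : Int :=
  if h : lo < hi then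
    let mid := PySem.Int.floordiv (lo + hi + 1) 2
    if PySem.Int.floordiv (mid * (2 * n - mid + 1)) 2 ≤ D then pvBSearch n D mid hi
    else pvBSearch n D lo (mid - 1)
  else lo
termination_by (hi - lo).toNat
decreasing_by
  · have := pvMid_bounds lo hi h; omega
  · have := pvMid_bounds lo hi h; omega

def lexSmallestNegatedPerm_alt (n : Int) (target : Int) : List Int :=
  if n ≤ 0 then []
  else
    let tot := PySem.Int.floordiv (n * (n + 1)) 2
    if |target| > tot ∨ PySem.Int.mod (tot + target) 2 ≠ 0 then []
    else
      let D := PySem.Int.floordiv (tot - target) 2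
      let m := pvBSearch n D 0 n
      let r := D - PySem.Int.floordiv (m * (2 * n - m + 1)) 2
      let head := PySem.List.pyRange (-n) (-n + m) 1
      let head := if r ≠ 0 then head ++ [-r] else head
      head ++ (PySem.List.pyRange 1 (n - m + 1) 1).filter (fun i => i != r)

-- ===== PRECONDITION & SPEC =====
def Spec_lexSmallestNegatedPerm (n : Int) (target : Int) (out : List Int) : Prop := out = lexSmallestNegatedPerm_alt n target
instance (n : Int) (target : Int) (out : List Int) : Decidable (Spec_lexSmallestNegatedPerm n target out) := by unfold Spec_lexSmallestNegatedPerm; infer_instance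

-- ===== CLAIM (what is proved, stated in full; the proofs are below) =====
def Claim_equal_lexSmallestNegatedPerm : Prop := ∀ (n : Int) (target : Int), Dom_lexSmallestNegatedPerm n target → Spec_lexSmallestNegatedPerm n target (lexSmallestNegatedPerm n target)

-- ===== LEMMAS AND PROOFS =====

-- triangular number k*(k+1)//2 (Python's // on these operands = Lean's ediv: divisor positive)
def pvS (k : Int) : Int := k * (k + 1) / 2

theorem pvS_two (k : Int) : 2 * pvS k = k * (k + 1) := by
  obtain ⟨c, hc⟩ := Int.even_mul_succ_self k
  unfold pvS
  omega

theorem pvS_succ (k : Int) : pvS (k + 1) = pvS k + (k + 1) := by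
  have a := pvS_two k
  have b := pvS_two (k + 1)
  have e : (k + 1) * (k + 1 + 1) = k * (k + 1) + 2 * (k + 1) := by ring
  omega

theorem pvS_mono {a b : Int} (h0 : 0 ≤ a) (h : a ≤ b) : pvS a ≤ pvS b := by
  have ha := pvS_two a
  have hb := pvS_two b
  nlinarith

-- the marks A's first loop records, as a recursion over the loop counter (descending)
def pvGreedy : Nat → Int → List Nat
  | 0, _ => []
  | (i + 1), rem =>
    if rem > pvS i then (i + 1) :: pvGreedy i (rem - (i + 1)) else pvGreedy i rem

theorem pvGreedy_mem : ∀ (N : Nat) (rem : Int) (j : Nat), j ∈ pvGreedy N rem → 1 ≤ j ∧ j ≤ N := by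
  intro N
  induction N with
  | zero => intro rem j h; simp [pvGreedy] at h
  | succ i ih =>
    intro rem j h
    unfold pvGreedy at h
    split at h
    · rcases List.mem_cons.mp h with h | h
      · omega
      · have := ih _ _ h; omega
    · have := ih _ _ h; omega

-- A's greedy marks exactly {1..K} \ {S}
theorem pvGreedy_char : ∀ (N K S : Nat), K ≤ N → (S = 0 ∨ S < K) → ∀ j : Nat,
    (j ∈ pvGreedy N (pvS K - S) ↔ 1 ≤ j ∧ j ≤ K ∧ j ≠ S) := by
  intro N
  induction N with
  | zero =>
    intro K S hK hS j
    have : K = 0 := by omega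
    subst this
    simp [pvGreedy]
    omega
  | succ i ih =>
    intro K S hK hS j
    unfold pvGreedy
    have hci : ((i + 1 : Nat) : Int) = (i : Int) + 1 := by push_cast; ring
    by_cases hKi : K = i + 1
    · subst hKi
      have hsucc := pvS_succ (i : Int)
      rw [hci] at *
      have hlt : pvS ((i : Int) + 1) - (S : Int) > pvS i := by omega
      rw [if_pos hlt]
      by_cases hSi : S = i ∧ S ≠ 0
      · -- removed element is exactly i: tail is the full run {1..i-1}
        obtain ⟨hSi, hS0⟩ := hSi
        have hi1 : 1 ≤ i := by omega
        have hSiZ : (S : Int) = (i : Int) := by exact_mod_cast hSi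
        have hc2 : ((i - 1 : Nat) : Int) = (i : Int) - 1 := by omega
        have h2 := pvS_succ ((i : Int) - 1)
        have harg : pvS ((i : Int) + 1) - (S : Int) - ((i : Int) + 1)
            = pvS ((i - 1 : Nat) : Int) - ((0 : Nat) : Int) := by
          rw [hc2]
          have e : (i : Int) - 1 + 1 = (i : Int) := by ring
          rw [e] at h2
          push_cast
          omega
        rw [harg, List.mem_cons, ih (i - 1) 0 (by omega) (Or.inl rfl) j]
        omega
      · -- removed element is below i (or nothing): recurse with the same S
        have hS' : S = 0 ∨ S < i := by omega
        have harg : pvS ((i : Int) + 1) - (S : Int) - ((i : Int) + 1) = pvS ((i : Nat) : Int) - (S : Int) := by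
          omega
        rw [harg, List.mem_cons, ih i S (by omega) hS' j]
        omega
    · -- K ≤ i: the head is skipped
      have hK' : K ≤ i := by omega
      have hle : ¬ (pvS K - (S : Int) > pvS i) := by
        have := pvS_mono (by positivity : (0:Int) ≤ (K : Int)) (by exact_mod_cast hK' : (K : Int) ≤ (i : Int))
        omega
      rw [if_neg hle]
      exact ih K S hK' hS j

-- A's first loop = applying pvGreedy's marks
theorem pvLoop1 : ∀ (N : Nat) (rem : Int) (pos₀ : List Bool),
    ((PySem.List.pyRange (N : Int) 0 (-1)).foldl
      (fun (st : List Bool × Int) i =>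
        let sPrev := PySem.Int.floordiv ((i - 1) * i) 2
        if st.2 > sPrev then (st.1.set i.toNat true, st.2 - i) else st)
      (pos₀, rem)).1
    = (pvGreedy N rem).foldl (fun l i => l.set i true) pos₀ := by
  intro N
  induction N with
  | zero =>
    intro rem pos₀
    rw [PySem.List.pyRange_neg_one_eq_nil (by omega)]
    simp [pvGreedy]
  | succ i ih =>
    intro rem pos₀
    have hcast : ((i + 1 : Nat) : Int) = (i : Int) + 1 := by push_cast; ring
    have hS : PySem.Int.floordiv ((i : Int) * ((i : Int) + 1)) 2 = pvS i := by
      rw [PySem.Int.floordiv_eq_ediv_of_pos (by norm_num)]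
      unfold pvS
      ring_nf
    have htn : ((i : Int) + 1).toNat = i + 1 := by omega
    rw [hcast, PySem.List.pyRange_neg_one_cons (by omega), List.foldl_cons,
      show (i : Int) + 1 - 1 = (i : Int) by ring]
    have hhead : (let sPrev := PySem.Int.floordiv ((i : Int) * ((i : Int) + 1)) 2;
        if (pos₀, rem).2 > sPrev then ((pos₀, rem).1.set ((i : Int) + 1).toNat true, (pos₀, rem).2 - ((i : Int) + 1))
        else (pos₀, rem))
        = if rem > pvS i then (pos₀.set (i + 1) true, rem - ((i : Int) + 1)) else (pos₀, rem) := by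
      simp only [hS, htn]
    rw [hhead]
    show _ = List.foldl _ pos₀ (pvGreedy (i + 1) rem)
    unfold pvGreedy
    by_cases h : rem > pvS i
    · rw [if_pos h, if_pos h, List.foldl_cons]
      exact ih _ _
    · rw [if_neg h, if_neg h]
      exact ih _ _

theorem pvGetSet : ∀ (L : List Nat) (pos₀ : List Bool) (j : Nat),
    (∀ i ∈ L, i < pos₀.length) →
    (L.foldl (fun l i => l.set i true) pos₀).getD j false
      = (decide (j ∈ L) || pos₀.getD j false) := by
  intro L
  induction L with
  | nil => intro pos₀ j h; simp
  | cons i L ih =>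
    intro pos₀ j h
    have hlen : ∀ a ∈ L, a < (pos₀.set i true).length := by
      intro a ha; rw [List.length_set]; exact h a (List.mem_cons_of_mem _ ha)
    simp only [List.foldl_cons]
    rw [ih _ j hlen]
    have hi : i < pos₀.length := h i List.mem_cons_self
    by_cases hij : j ∈ L
    · simp [hij]
    · by_cases hji : j = i
      · subst hji
        simp [hij, List.getD_eq_getElem?_getD, hi]
      · simp [hij, hji, List.getD_eq_getElem?_getD, Ne.symm hji]

-- reversed negation of an ascending range is an ascending range
theorem pvRevNeg (a b : Int) :
    ((PySem.List.pyRange a b 1).map (fun x => -x)).reverse = PySem.List.pyRange (-b + 1) (-a + 1) 1 := by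
  apply List.ext_getElem
  · simp [PySem.List.length_pyRange_one]; omega
  · intro k h1 h2
    simp only [List.getElem_reverse, List.getElem_map, List.length_map] at *
    rw [PySem.List.getElem_pyRange_one, PySem.List.getElem_pyRange_one]
    simp only [PySem.List.length_pyRange_one] at h1 h2 ⊢
    omega

-- a nodup-range filter keeping a single present value
theorem pvFilterSingle (k s : Int) (h1 : 1 ≤ s) (h2 : s ≤ k) :
    (PySem.List.pyRange 1 (k + 1) 1).filter (fun i => i == s) = [s] := by
  rw [List.filter_beq]
  have hm : s ∈ PySem.List.pyRange 1 (k + 1) 1 := PySem.List.mem_pyRange_one.mpr (by omega)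
  rw [List.count_eq_one_of_mem (PySem.List.nodup_pyRange_one _ _) hm]
  simp

-- the binary search returns the largest m in [lo, hi] whose top-m sum fits
theorem pvBSearch_spec : ∀ (n D lo hi : Int), lo ≤ hi →
    PySem.Int.floordiv (lo * (2 * n - lo + 1)) 2 ≤ D →
    (hi < n → D < PySem.Int.floordiv ((hi + 1) * (2 * n - (hi + 1) + 1)) 2) →
    lo ≤ pvBSearch n D lo hi ∧ pvBSearch n D lo hi ≤ hi ∧
    PySem.Int.floordiv (pvBSearch n D lo hi * (2 * n - pvBSearch n D lo hi + 1)) 2 ≤ D ∧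
    (pvBSearch n D lo hi < n →
      D < PySem.Int.floordiv ((pvBSearch n D lo hi + 1) * (2 * n - (pvBSearch n D lo hi + 1) + 1)) 2) := by
  intro n D lo hi
  induction lo, hi using pvBSearch.induct n D with
  | case1 lo hi h mid hT ih =>
    intro _ hlo hhi
    have hb := pvMid_bounds lo hi h
    rw [pvBSearch]
    simp only [dif_pos h]
    rw [show PySem.Int.floordiv (lo + hi + 1) 2 = mid from rfl, if_pos hT]
    exact ⟨by have := (ih (by omega) hT hhi).1; omega, (ih (by omega) hT hhi).2⟩
  | case2 lo hi h mid hT ih =>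
    intro _ hlo hhi
    have hb := pvMid_bounds lo hi h
    rw [pvBSearch]
    simp only [dif_pos h]
    rw [show PySem.Int.floordiv (lo + hi + 1) 2 = mid from rfl, if_neg hT]
    have := ih (by omega) hlo (fun _ => by rw [show mid - 1 + 1 = mid by ring]; exact lt_of_not_ge hT)
    exact ⟨this.1, by omega, this.2.2⟩
  | case3 lo hi h =>
    intro h1 hlo hhi
    rw [pvBSearch]
    simp only [dif_neg h]
    have : lo = hi := by omega
    subst this
    exact ⟨le_refl _, le_refl _, hlo, hhi⟩

-- exact value of the even division in the top-m sum
theorem pvT_two (n m : Int) :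
    2 * PySem.Int.floordiv (m * (2 * n - m + 1)) 2 = m * (2 * n - m + 1) := by
  obtain ⟨c, hc⟩ := Int.even_mul_succ_self (m - 1)
  rw [PySem.Int.floordiv_eq_ediv_of_pos (by norm_num)]
  have h1 : m * (2 * n - m + 1) = 2 * (n * m) - (c + c) := by
    rw [← hc]; ring
  omega

-- ===== VERDICT (by name: the statement is the Claim_ definition above) =====
theorem lexSmallestNegatedPerm_spec : Claim_equal_lexSmallestNegatedPerm := by
  unfold Claim_equal_lexSmallestNegatedPerm
  intro n target _
  unfold Spec_lexSmallestNegatedPerm lexSmallestNegatedPerm lexSmallestNegatedPerm_alt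
  simp only [PySem.Int.band_one]
  by_cases hn : n ≤ 0
  · -- n ≤ 0: both sides are [] whichever way A's guard goes
    rw [if_pos hn]
    split
    · rfl
    · rw [PySem.List.pyRange_neg_one_eq_nil (show n ≤ (0:Int) from hn),
        PySem.List.pyRange_one_eq_nil (show n + 1 ≤ 1 by omega)]
      simp
  · rw [if_neg hn]
    have htot : PySem.Int.floordiv (n * (n + 1)) 2 = pvS n := by
      rw [PySem.Int.floordiv_eq_ediv_of_pos (by norm_num)]
      unfold pvS
      ring_nf
    rw [htot]
    by_cases hg : |target| > pvS n ∨ PySem.Int.mod (pvS n + target) 2 ≠ 0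
    · rw [if_pos hg, if_pos hg]
    · rw [if_neg hg, if_neg hg]
      push Not at hg
      obtain ⟨habs, hpar⟩ := hg
      lift n to ℕ using (by omega : (0:Int) ≤ n) with N
      have hN1 : 1 ≤ N := by omega
      -- arithmetic facts
      have hdvd : (2:Int) ∣ (pvS N + target) := (PySem.Int.mod_eq_zero_iff_dvd _ _).mp hpar
      obtain ⟨c, hc⟩ := hdvd
      have hx2 : 2 * PySem.Int.floordiv (pvS N + target) 2 = pvS N + target := by
        rw [PySem.Int.floordiv_eq_ediv_of_pos (by norm_num)]
        omega
      have hD2 : 2 * PySem.Int.floordiv (pvS N - target) 2 = pvS N - target := by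
        rw [PySem.Int.floordiv_eq_ediv_of_pos (by norm_num)]
        omega
      set x := PySem.Int.floordiv (pvS N + target) 2 with hxdef
      set D := PySem.Int.floordiv (pvS N - target) 2 with hDdef
      have habs' : -pvS N ≤ target ∧ target ≤ pvS N := abs_le.mp habs
      have hD0 : (0:Int) ≤ D := by omega
      have hDle : D ≤ pvS N := by omega
      -- binary-search facts
      have hT0 : PySem.Int.floordiv ((0:Int) * (2 * (N:Int) - 0 + 1)) 2 = 0 := by
        have := pvT_two (N:Int) 0
        omega
      have hbs := pvBSearch_spec (N:Int) D 0 N (by omega) (by omega)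
        (fun h => absurd h (lt_irrefl _))
      set m := pvBSearch (N:Int) D 0 (N:Int) with hmdef
      obtain ⟨hm0, hmn, hTm, hnext⟩ := hbs
      have hT2 := pvT_two (N:Int) m
      set Tm := PySem.Int.floordiv (m * (2 * (N:Int) - m + 1)) 2 with hTmdef
      set r := D - Tm with hrdef
      have hr0 : (0:Int) ≤ r := by omega
      have hSn2 := pvS_two (N:Int)
      have hSk2 := pvS_two ((N:Int) - m)
      have hTmS : Tm = pvS (N:Int) - pvS ((N:Int) - m) := by
        have e2 : m * (2 * (N:Int) - m + 1) = (N:Int) * ((N:Int) + 1) - ((N:Int) - m) * ((N:Int) - m + 1) := by ring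
        omega
      have hrk : r = 0 ∨ r < (N:Int) - m := by
        by_cases hmlt : m < (N:Int)
        · right
          have hT2' := pvT_two (N:Int) (m + 1)
          have := hnext hmlt
          have e : (m + 1) * (2 * (N:Int) - (m + 1) + 1) = m * (2 * (N:Int) - m + 1) + 2 * ((N:Int) - m) := by ring
          omega
        · left
          have hmn' : m = (N:Int) := by omega
          have e : (N:Int) * (2 * (N:Int) - (N:Int) + 1) = (N:Int) * ((N:Int) + 1) := by ring
          rw [hmn'] at hT2
          omega
      have hxk : x = pvS ((N:Int) - m) - r := by omega
      -- naturalized parameters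
      set K : Nat := ((N:Int) - m).toNat with hKdef
      set R : Nat := r.toNat with hRdef
      have hKc : ((K:Nat):Int) = (N:Int) - m := by omega
      have hRc : ((R:Nat):Int) = r := by omega
      have hKN : K ≤ N := by omega
      have hSR : R = 0 ∨ R < K := by omega
      have hchar : ∀ j : Nat, j ∈ pvGreedy N x ↔ 1 ≤ j ∧ j ≤ K ∧ j ≠ R := by
        have h := pvGreedy_char N K R hKN hSR
        have e : pvS (K:Int) - (R:Int) = x := by rw [hKc, hRc]; omega
        rw [e] at h
        exact h
      -- the mark array read back
      have hrepl : ((N:Int) + 1).toNat = N + 1 := by omega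
      rw [hrepl, pvLoop1 N x (List.replicate (N + 1) false)]
      have hpos : ∀ i : Nat,
          ((pvGreedy N x).foldl (fun l i => l.set i true) (List.replicate (N + 1) false)).getD i false
            = decide (i ∈ pvGreedy N x) := by
        intro i
        rw [pvGetSet _ _ _ (fun a ha => by
          have := pvGreedy_mem N x a ha
          rw [List.length_replicate]
          omega)]
        simp
      rw [PySem.List.foldl_append_if, PySem.List.foldl_append_if]
      set posL := List.foldl (fun l i => l.set i true) (List.replicate (N + 1) false) (pvGreedy N x)
        with hposLdef
      simp only [List.map_id', List.nil_append]
      rw [PySem.List.pyRange_neg_one_eq_reverse, show (0:Int) + 1 = 1 from by norm_num,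
        List.filter_reverse,
        PySem.List.pyRange_one_append 1 ((N:Int) - m + 1) ((N:Int) + 1) (by omega) (by omega),
        List.filter_append, List.filter_append]
      -- per-element values of the mark predicate on each segment
      have hval : ∀ i : Int, 1 ≤ i → i < (N:Int) + 1 →
          posL.getD i.toNat false = decide (i ≤ (N:Int) - m ∧ i ≠ r) := by
        intro i h1 h2
        rw [hpos]
        refine decide_eq_decide.mpr ?_
        rw [hchar]
        constructor <;> intro h <;> omega
      have hlow2 : List.filter (fun i => posL.getD i.toNat false)
            (PySem.List.pyRange 1 ((N:Int) - m + 1))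
          = List.filter (fun i => i != r) (PySem.List.pyRange 1 ((N:Int) - m + 1)) := by
        apply List.filter_congr
        intro i hi
        have hb := PySem.List.mem_pyRange_one.mp hi
        rw [hval i (by omega) (by omega)]
        have : (i ≤ (N:Int) - m ∧ i ≠ r) ↔ i ≠ r := by constructor <;> intro h <;> [exact h.2; exact ⟨by omega, h⟩]
        have hdd : decide (i ≤ (N:Int) - m ∧ i ≠ r) = decide (i ≠ r) := decide_eq_decide.mpr this
        rw [hdd]
        by_cases h : i = r <;> simp [h]
      have hhigh2 : List.filter (fun i => posL.getD i.toNat false)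
            (PySem.List.pyRange ((N:Int) - m + 1) ((N:Int) + 1)) = [] := by
        rw [List.filter_eq_nil_iff]
        intro i hi
        have hb := PySem.List.mem_pyRange_one.mp hi
        rw [hval i (by omega) (by omega)]
        simp
        omega
      have hhigh1 : List.filter (fun i => !posL.getD i.toNat false)
            (PySem.List.pyRange ((N:Int) - m + 1) ((N:Int) + 1))
          = PySem.List.pyRange ((N:Int) - m + 1) ((N:Int) + 1) := by
        rw [List.filter_eq_self]
        intro i hi
        have hb := PySem.List.mem_pyRange_one.mp hi
        rw [hval i (by omega) (by omega)]
        simp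
        omega
      have hlow1 : List.filter (fun i => !posL.getD i.toNat false)
            (PySem.List.pyRange 1 ((N:Int) - m + 1))
          = if r = 0 then [] else [r] := by
        have hcg : List.filter (fun i => !posL.getD i.toNat false)
              (PySem.List.pyRange 1 ((N:Int) - m + 1))
            = List.filter (fun i => i == r) (PySem.List.pyRange 1 ((N:Int) - m + 1)) := by
          apply List.filter_congr
          intro i hi
          have hb := PySem.List.mem_pyRange_one.mp hi
          rw [hval i (by omega) (by omega)]
          by_cases h : i = r
          · subst h
            simp
          · have hbf : (i == r) = false := beq_eq_false_iff_ne.mpr h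
            simp [hbf, h]
            omega
        rw [hcg]
        by_cases hr : r = 0
        · rw [if_pos hr, List.filter_eq_nil_iff]
          intro i hi
          have hb := PySem.List.mem_pyRange_one.mp hi
          simp
          omega
        · rw [if_neg hr]
          exact pvFilterSingle ((N:Int) - m) r (by omega) (by omega)
      rw [hlow2, hhigh2, hhigh1, hlow1]
      rw [List.reverse_append, List.map_append, List.map_reverse, pvRevNeg,
        show -((N:Int) + 1) + 1 = -(N:Int) from by ring,
        show -((N:Int) - m + 1) + 1 = -(N:Int) + m from by ring]
      by_cases hr : r = 0
      · rw [if_pos hr, if_neg (by omega : ¬ r ≠ 0)]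
        simp
      · rw [if_neg hr, if_pos hr]
        simp
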